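-- pv_equiv track=rewrite | github.com/malayamanas/threat-hunt-ai | marketplace/plugins/fsiem-essentials/scripts/investigation_pipeline.py | _gen_short_term_recs
-- ===== SOURCE A (Python) =====
-- def _gen_short_term_recs(incident, techniques, l2_result) -> list:
--     recs = []
--     title = incident.get("incidentTitle", "").lower()
--
--     # C2 / Malicious IP
--     if any(t.get("id") == "T1071" for t in techniques) or "malicious" in title or "ioc" in title:
--         recs.append("Run full endpoint scan (EDR/AV) on all affected internal hosts")
--         recs.append("Review DNS logs for the malicious IP -- identify all internal hosts that contacted it")
--         recs.append("Check firewall logs for other hosts communicating with the same external IP")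
--         recs.append("Review proxy/web filter logs for related malicious domains")
--         recs.append("Check if the malicious IP appears in any threat intel watchlists")
--
--     # ARP poisoning
--     elif any("T1557" in t.get("id","") for t in techniques):
--         recs.append("Enable Dynamic ARP Inspection (DAI) on affected VLANs")
--         recs.append("Enable DHCP snooping as prerequisite for DAI")
--         recs.append("Configure port security with maximum MAC address limit")
--         recs.append("Review all active sessions from the identified MAC/IP")
--
--     # DLP correlation
--     for ci in l2_result.get("correlated_incidents", {}).get("same_org", []):
--         if "dlp" in ci.get("title", "").lower():
--             recs.append("Investigate DLP violations -- determine if data was exfiltrated during attack window")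
--             break
--
--     # Account lockouts
--     for ci in l2_result.get("correlated_incidents", {}).get("same_org", []):
--         if "locked" in ci.get("title", "").lower():
--             recs.append("Force password reset for locked accounts detected during incident window")
--             break
--
--     # Bulk email correlation
--     for ci in l2_result.get("correlated_incidents", {}).get("same_org", []):
--         if "bulk mail" in ci.get("title", "").lower() or "spam" in ci.get("title", "").lower():
--             recs.append("Investigate bulk email activity -- check if compromised account is sending spam/phishing")
--             break
--
--     if not recs:
--         recs.append("Review firewall rules for affected network segments")
--         recs.append("Scan affected hosts for indicators of compromise")
--
--     return recs
-- ===== SOURCE B (Python) =====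
-- def _gen_short_term_recs(incident, techniques, l2_result) -> list:
--     title = incident.get("incidentTitle", "").lower()
--
--     # head block: C2 / ARP recommendations chosen as a list literal
--     if any(t.get("id") == "T1071" for t in techniques) or "malicious" in title or "ioc" in title:
--         head = [
--             "Run full endpoint scan (EDR/AV) on all affected internal hosts",
--             "Review DNS logs for the malicious IP -- identify all internal hosts that contacted it",
--             "Check firewall logs for other hosts communicating with the same external IP",
--             "Review proxy/web filter logs for related malicious domains",
--             "Check if the malicious IP appears in any threat intel watchlists",
--         ]
--     elif any("T1557" in t.get("id", "") for t in techniques):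
--         head = [
--             "Enable Dynamic ARP Inspection (DAI) on affected VLANs",
--             "Enable DHCP snooping as prerequisite for DAI",
--             "Configure port security with maximum MAC address limit",
--             "Review all active sessions from the identified MAC/IP",
--         ]
--     else:
--         head = []
--
--     # one pass over the correlated incidents, setting three flags
--     dlp = lock = bulk = False
--     for ci in l2_result.get("correlated_incidents", {}).get("same_org", []):
--         t = ci.get("title", "").lower()
--         if "dlp" in t:
--             dlp = True
--         if "locked" in t:
--             lock = True
--         if "bulk mail" in t or "spam" in t:
--             bulk = True
--
--     corr = [msg for flag, msg in (
--         (dlp, "Investigate DLP violations -- determine if data was exfiltrated during attack window"),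
--         (lock, "Force password reset for locked accounts detected during incident window"),
--         (bulk, "Investigate bulk email activity -- check if compromised account is sending spam/phishing"),
--     ) if flag]
--
--     recs = head + corr
--     return recs if recs else [
--         "Review firewall rules for affected network segments",
--         "Scan affected hosts for indicators of compromise",
--     ]
-- ===== Notes on version B (the rewrite author's own statement) =====
-- stated objective: simpler
-- what changed: The three separate scan-and-break loops over the same correlated-incident list are merged into one pass that sets three flags, and the result is assembled by concatenating list literals (head + filtered flag messages + fallback expression) instead of sequential appends.
import Mathlib
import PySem

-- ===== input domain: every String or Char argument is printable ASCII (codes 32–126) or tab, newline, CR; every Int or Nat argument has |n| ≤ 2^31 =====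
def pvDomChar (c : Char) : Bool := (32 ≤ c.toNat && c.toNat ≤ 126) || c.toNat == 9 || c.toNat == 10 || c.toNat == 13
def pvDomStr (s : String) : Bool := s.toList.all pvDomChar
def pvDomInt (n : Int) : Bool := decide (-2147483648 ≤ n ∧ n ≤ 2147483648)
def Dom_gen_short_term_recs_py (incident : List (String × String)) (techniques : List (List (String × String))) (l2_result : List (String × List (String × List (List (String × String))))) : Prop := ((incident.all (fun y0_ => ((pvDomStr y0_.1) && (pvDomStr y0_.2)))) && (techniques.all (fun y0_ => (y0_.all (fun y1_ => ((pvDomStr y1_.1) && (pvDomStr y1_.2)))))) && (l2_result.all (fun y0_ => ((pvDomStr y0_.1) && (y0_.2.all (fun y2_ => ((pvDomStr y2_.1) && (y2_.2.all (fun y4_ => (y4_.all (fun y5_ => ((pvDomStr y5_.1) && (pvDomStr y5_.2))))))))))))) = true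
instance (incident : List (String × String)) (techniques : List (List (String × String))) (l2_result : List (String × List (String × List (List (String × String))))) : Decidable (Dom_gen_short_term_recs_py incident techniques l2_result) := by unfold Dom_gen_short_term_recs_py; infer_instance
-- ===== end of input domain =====

-- B replaces the three scan-and-break loops by a single pass setting three flags and
-- builds the result by list concatenation instead of sequential appends (objective: simpler).

-- shared helper: dict.get(k, default) on an association list (first match)
def alGetD {α : Type} (l : List (String × α)) (k : String) (d : α) : α :=
  match l.find? (fun p => p.1 == k) with
  | some p => p.2
  | none => d

-- shared helper: dict.get(k) on an association list (first match, None if absent)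
def alGet? {α : Type} (l : List (String × α)) (k : String) : Option α :=
  (l.find? (fun p => p.1 == k)).map (·.2)

-- ===== PORT A =====
-- 'for ci in same_org: if p ci: append; break' — the break-loop reduced to its first-match test
def aScan (p : List (String × String) → Bool) : List (List (String × String)) → Bool
  | [] => false
  | ci :: rest => if p ci then true else aScan p rest

def gen_short_term_recs_py (incident : List (String × String)) (techniques : List (List (String × String))) (l2_result : List (String × List (String × List (List (String × String))))) : List String :=
  let title := PySem.Str.lower (alGetD incident "incidentTitle" "")
  let recs : List String := []
  let recs :=
    if techniques.any (fun t => alGet? t "id" == some "T1071") || PySem.Str.isIn "malicious" title || PySem.Str.isIn "ioc" title then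
      recs ++ ["Run full endpoint scan (EDR/AV) on all affected internal hosts",
               "Review DNS logs for the malicious IP -- identify all internal hosts that contacted it",
               "Check firewall logs for other hosts communicating with the same external IP",
               "Review proxy/web filter logs for related malicious domains",
               "Check if the malicious IP appears in any threat intel watchlists"]
    else if techniques.any (fun t => PySem.Str.isIn "T1557" (alGetD t "id" "")) then
      recs ++ ["Enable Dynamic ARP Inspection (DAI) on affected VLANs",
               "Enable DHCP snooping as prerequisite for DAI",
               "Configure port security with maximum MAC address limit",
               "Review all active sessions from the identified MAC/IP"]
    else recs
  let same_org := alGetD (alGetD l2_result "correlated_incidents" []) "same_org" []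
  let recs :=
    if aScan (fun ci => PySem.Str.isIn "dlp" (PySem.Str.lower (alGetD ci "title" ""))) same_org then
      recs ++ ["Investigate DLP violations -- determine if data was exfiltrated during attack window"]
    else recs
  let recs :=
    if aScan (fun ci => PySem.Str.isIn "locked" (PySem.Str.lower (alGetD ci "title" ""))) same_org then
      recs ++ ["Force password reset for locked accounts detected during incident window"]
    else recs
  let recs :=
    if aScan (fun ci => PySem.Str.isIn "bulk mail" (PySem.Str.lower (alGetD ci "title" "")) || PySem.Str.isIn "spam" (PySem.Str.lower (alGetD ci "title" ""))) same_org then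
      recs ++ ["Investigate bulk email activity -- check if compromised account is sending spam/phishing"]
    else recs
  if recs = [] then
    recs ++ ["Review firewall rules for affected network segments",
             "Scan affected hosts for indicators of compromise"]
  else recs

-- ===== PORT B =====
def gen_short_term_recs_py_alt (incident : List (String × String)) (techniques : List (List (String × String))) (l2_result : List (String × List (String × List (List (String × String))))) : List String :=
  let title := PySem.Str.lower (alGetD incident "incidentTitle" "")
  let head : List String :=
    if techniques.any (fun t => alGet? t "id" == some "T1071") || PySem.Str.isIn "malicious" title || PySem.Str.isIn "ioc" title then
      ["Run full endpoint scan (EDR/AV) on all affected internal hosts",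
       "Review DNS logs for the malicious IP -- identify all internal hosts that contacted it",
       "Check firewall logs for other hosts communicating with the same external IP",
       "Review proxy/web filter logs for related malicious domains",
       "Check if the malicious IP appears in any threat intel watchlists"]
    else if techniques.any (fun t => PySem.Str.isIn "T1557" (alGetD t "id" "")) then
      ["Enable Dynamic ARP Inspection (DAI) on affected VLANs",
       "Enable DHCP snooping as prerequisite for DAI",
       "Configure port security with maximum MAC address limit",
       "Review all active sessions from the identified MAC/IP"]
    else []
  let flags :=
    (alGetD (alGetD l2_result "correlated_incidents" []) "same_org" []).foldl
      (fun (f : Bool × Bool × Bool) ci =>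
        let t := PySem.Str.lower (alGetD ci "title" "")
        (f.1 || PySem.Str.isIn "dlp" t,
         f.2.1 || PySem.Str.isIn "locked" t,
         f.2.2 || (PySem.Str.isIn "bulk mail" t || PySem.Str.isIn "spam" t)))
      (false, false, false)
  let corr :=
    ([(flags.1, "Investigate DLP violations -- determine if data was exfiltrated during attack window"),
      (flags.2.1, "Force password reset for locked accounts detected during incident window"),
      (flags.2.2, "Investigate bulk email activity -- check if compromised account is sending spam/phishing")].filter (·.1)).map (·.2)
  let recs := head ++ corr
  if recs = [] then
    ["Review firewall rules for affected network segments",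
     "Scan affected hosts for indicators of compromise"]
  else recs

-- ===== PRECONDITION & SPEC =====
def Spec_gen_short_term_recs_py (incident : List (String × String)) (techniques : List (List (String × String))) (l2_result : List (String × List (String × List (List (String × String))))) (out : List String) : Prop := out = gen_short_term_recs_py_alt incident techniques l2_result
instance (incident : List (String × String)) (techniques : List (List (String × String))) (l2_result : List (String × List (String × List (List (String × String))))) (out : List String) : Decidable (Spec_gen_short_term_recs_py incident techniques l2_result out) := by unfold Spec_gen_short_term_recs_py; infer_instance

-- ===== CLAIM (what is proved, stated in full; the proofs are below) =====
def Claim_equal_gen_short_term_recs_py : Prop := ∀ (incident : List (String × String)) (techniques : List (List (String × String))) (l2_result : List (String × List (String × List (List (String × String))))), Dom_gen_short_term_recs_py incident techniques l2_result → Spec_gen_short_term_recs_py incident techniques l2_result (gen_short_term_recs_py incident techniques l2_result)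

-- ===== LEMMAS AND PROOFS =====

lemma aScan_eq_any (p : List (String × String) → Bool) (l : List (List (String × String))) :
    aScan p l = l.any p := by
  induction l with
  | nil => rfl
  | cons ci rest ih => by_cases h : p ci <;> simp [aScan, h, ih]

lemma flags_eq (pD pL pB : List (String × String) → Bool) :
    ∀ (l : List (List (String × String))) (a b c : Bool),
      l.foldl (fun (f : Bool × Bool × Bool) ci => (f.1 || pD ci, f.2.1 || pL ci, f.2.2 || pB ci)) (a, b, c)
        = (a || l.any pD, b || l.any pL, c || l.any pB) := by
  intro l
  induction l with
  | nil => simp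
  | cons ci rest ih =>
    intro a b c
    simp [List.foldl_cons, ih, Bool.or_assoc]

-- the common assembly step: sequential guarded appends = head ++ filtered messages
lemma assemble (H : List String) (d l b : Bool) :
    (if (if b then
          (if l then
            (if d then H ++ ["Investigate DLP violations -- determine if data was exfiltrated during attack window"] else H)
              ++ ["Force password reset for locked accounts detected during incident window"]
           else
            (if d then H ++ ["Investigate DLP violations -- determine if data was exfiltrated during attack window"] else H))
            ++ ["Investigate bulk email activity -- check if compromised account is sending spam/phishing"]
         else
          (if l then
            (if d then H ++ ["Investigate DLP violations -- determine if data was exfiltrated during attack window"] else H)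
              ++ ["Force password reset for locked accounts detected during incident window"]
           else
            (if d then H ++ ["Investigate DLP violations -- determine if data was exfiltrated during attack window"] else H))) = ([] : List String)
     then (if b then
          (if l then
            (if d then H ++ ["Investigate DLP violations -- determine if data was exfiltrated during attack window"] else H)
              ++ ["Force password reset for locked accounts detected during incident window"]
           else
            (if d then H ++ ["Investigate DLP violations -- determine if data was exfiltrated during attack window"] else H))
            ++ ["Investigate bulk email activity -- check if compromised account is sending spam/phishing"]
         else
          (if l then
            (if d then H ++ ["Investigate DLP violations -- determine if data was exfiltrated during attack window"] else H)
              ++ ["Force password reset for locked accounts detected during incident window"]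
           else
            (if d then H ++ ["Investigate DLP violations -- determine if data was exfiltrated during attack window"] else H)))
          ++ ["Review firewall rules for affected network segments",
              "Scan affected hosts for indicators of compromise"]
     else (if b then
          (if l then
            (if d then H ++ ["Investigate DLP violations -- determine if data was exfiltrated during attack window"] else H)
              ++ ["Force password reset for locked accounts detected during incident window"]
           else
            (if d then H ++ ["Investigate DLP violations -- determine if data was exfiltrated during attack window"] else H))
            ++ ["Investigate bulk email activity -- check if compromised account is sending spam/phishing"]
         else
          (if l then
            (if d then H ++ ["Investigate DLP violations -- determine if data was exfiltrated during attack window"] else H)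
              ++ ["Force password reset for locked accounts detected during incident window"]
           else
            (if d then H ++ ["Investigate DLP violations -- determine if data was exfiltrated during attack window"] else H))))
    = (if H ++ (([(d, "Investigate DLP violations -- determine if data was exfiltrated during attack window"),
                  (l, "Force password reset for locked accounts detected during incident window"),
                  (b, "Investigate bulk email activity -- check if compromised account is sending spam/phishing")].filter (·.1)).map (·.2)) = []
       then ["Review firewall rules for affected network segments",
             "Scan affected hosts for indicators of compromise"]
       else H ++ (([(d, "Investigate DLP violations -- determine if data was exfiltrated during attack window"),
                    (l, "Force password reset for locked accounts detected during incident window"),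
                    (b, "Investigate bulk email activity -- check if compromised account is sending spam/phishing")].filter (·.1)).map (·.2))) := by
  cases d <;> cases l <;> cases b <;> by_cases hH : H = [] <;> simp [hH, List.filter]

-- ===== VERDICT (by name: the statement is the Claim_ definition above) =====
theorem gen_short_term_recs_py_spec : Claim_equal_gen_short_term_recs_py := by
  intro incident techniques l2_result _
  unfold Spec_gen_short_term_recs_py gen_short_term_recs_py gen_short_term_recs_py_alt
  dsimp only
  simp only [aScan_eq_any, List.nil_append,
    flags_eq (fun ci => PySem.Str.isIn "dlp" (PySem.Str.lower (alGetD ci "title" "")))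
             (fun ci => PySem.Str.isIn "locked" (PySem.Str.lower (alGetD ci "title" "")))
             (fun ci => PySem.Str.isIn "bulk mail" (PySem.Str.lower (alGetD ci "title" "")) || PySem.Str.isIn "spam" (PySem.Str.lower (alGetD ci "title" "")))]
  exact assemble _ _ _ _
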